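-- pv_equiv track=rewrite | github.com/lishocking/PythonLearning | StockDownload/probility.py | statistic
-- ===== SOURCE A (Python) =====
-- def statistic(result,r_probility):
--     s_r=[[],[]]
--     l=len(result)
--     i=0
--     while i < l:
--         if result[i] not in s_r[0]:
--             s_r[0].append(result[i])
--             s_r[1].append(r_probility[i])
--         else:
--             index=s_r[0].index(result[i])
--             s_r[1][index]+=r_probility[i]
--         i+=1
--
--     return s_r
-- ===== SOURCE B (Python) =====
-- def statistic(result, r_probility):
--     uniques = list(dict.fromkeys(result))
--     totals = []
--     for v in uniques:
--         t = 0
--         for i in range(len(result)):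
--             if result[i] == v:
--                 t += r_probility[i]
--         totals.append(t)
--     return [uniques, totals]
-- ===== Notes on version B (the rewrite author's own statement) =====
-- stated objective: alternative
-- what changed: Replaces A's single accumulating scan (membership test + list.index + in-place increment per element) with two stages: first compute the distinct values in first-appearance order via dict.fromkeys, then for each distinct value run a full inner index scan summing its probabilities.
import Mathlib
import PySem

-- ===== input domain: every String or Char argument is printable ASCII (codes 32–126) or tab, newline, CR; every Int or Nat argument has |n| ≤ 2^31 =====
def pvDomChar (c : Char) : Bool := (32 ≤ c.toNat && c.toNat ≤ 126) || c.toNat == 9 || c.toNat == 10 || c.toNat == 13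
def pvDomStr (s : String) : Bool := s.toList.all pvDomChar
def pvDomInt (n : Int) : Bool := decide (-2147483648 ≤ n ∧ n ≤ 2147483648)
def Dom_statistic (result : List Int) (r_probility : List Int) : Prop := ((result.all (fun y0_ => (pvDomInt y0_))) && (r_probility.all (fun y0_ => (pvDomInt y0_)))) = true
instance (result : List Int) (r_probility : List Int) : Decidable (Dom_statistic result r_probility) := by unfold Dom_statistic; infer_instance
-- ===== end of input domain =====

-- B replaces A's single accumulating scan with a two-stage computation: dedup the values first, then one full summing scan per distinct value (alternative decomposition, same cost class).


-- ===== PORT A =====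
-- 'while i < l' over result[i]/r_probility[i]: fold over the index range; indexing is total (getD)
-- because Pre_ keeps every access in range (Python raises IndexError exactly outside Pre_).
def statistic (result : List Int) (r_probility : List Int) : List (List Int) :=
  let l := result.length
  let s_r := (List.range l).foldl
    (fun (s_r : List Int × List Int) i =>
      let x := result.getD i 0
      if s_r.1.contains x then
        let index := (PySem.List.index? s_r.1 x).getD 0
        (s_r.1, s_r.2.set index (s_r.2.getD index 0 + r_probility.getD i 0))
      else
        (s_r.1 ++ [x], s_r.2 ++ [r_probility.getD i 0]))
    ([], [])
  [s_r.1, s_r.2]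

-- ===== PORT B =====
-- uniques = list(dict.fromkeys(result)); then for each v an inner scan over range(len(result))
-- summing r_probility[i] where result[i] == v; totals built by appending.
def statistic_alt (result : List Int) (r_probility : List Int) : List (List Int) :=
  let uniques := PySem.List.dedup result
  let totals := uniques.foldl
    (fun (totals : List Int) v =>
      totals ++ [(List.range result.length).foldl
        (fun t i => if result.getD i 0 = v then t + r_probility.getD i 0 else t) 0])
    []
  [uniques, totals]

-- ===== PRECONDITION & SPEC =====
-- Pre_ excludes exactly the inputs where Python A raises IndexError: r_probility shorter than result.
def Pre_statistic (result : List Int) (r_probility : List Int) : Prop :=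
  result.length ≤ r_probility.length
instance (result : List Int) (r_probility : List Int) : Decidable (Pre_statistic result r_probility) := by unfold Pre_statistic; infer_instance
def pvWitness_statistic : List Int × List Int := ([1, 2, 1], [3, 4, 5])

def Spec_statistic (result : List Int) (r_probility : List Int) (out : List (List Int)) : Prop := out = statistic_alt result r_probility
instance (result : List Int) (r_probility : List Int) (out : List (List Int)) : Decidable (Spec_statistic result r_probility out) := by unfold Spec_statistic; infer_instance

-- ===== CLAIM (what is proved, stated in full; the proofs are below) =====
def Claim_equal_statistic : Prop := ∀ (result : List Int) (r_probility : List Int), Dom_statistic result r_probility → Pre_statistic result r_probility → Spec_statistic result r_probility (statistic result r_probility)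

-- ===== LEMMAS AND PROOFS =====

-- semantic reference: keys (first occurrences, in order) of a pair list, and per-key sum
def pvK (ps : List (Int × Int)) : List Int := PySem.Set.ofList (ps.map Prod.fst)
def pvS (ps : List (Int × Int)) (v : Int) : Int := (ps.map (fun p => if p.1 = v then p.2 else 0)).sum

lemma pvS_append (ps : List (Int × Int)) (p : Int × Int) (v : Int) :
    pvS (ps ++ [p]) v = pvS ps v + (if p.1 = v then p.2 else 0) := by
  simp [pvS]

lemma pvS_not_mem (ps : List (Int × Int)) (v : Int) (h : v ∉ ps.map Prod.fst) :
    pvS ps v = 0 := by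
  unfold pvS
  apply List.sum_eq_zero
  intro x hx
  simp only [List.mem_map] at hx
  obtain ⟨p, hp, rfl⟩ := hx
  have : p.1 ≠ v := fun e => h (List.mem_map.mpr ⟨p, hp, e⟩)
  simp [this]

-- A's loop, viewed on the zipped pair list, builds the deduped keys and the per-key sums
lemma pvA_invariant (ps : List (Int × Int)) :
    ps.foldl
      (fun (s_r : List Int × List Int) p =>
        if s_r.1.contains p.1 then
          let index := (PySem.List.index? s_r.1 p.1).getD 0
          (s_r.1, s_r.2.set index (s_r.2.getD index 0 + p.2))
        else
          (s_r.1 ++ [p.1], s_r.2 ++ [p.2]))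
      ([], [])
      = (pvK ps, (pvK ps).map (pvS ps)) := by
  induction ps using List.reverseRecOn with
  | nil => simp [pvK]
  | append_singleton qs p ih =>
    rw [List.foldl_append, ih]
    simp only [List.foldl_cons, List.foldl_nil]
    have hK : pvK (qs ++ [p]) = PySem.Set.add (pvK qs) p.1 := by
      simp [pvK, PySem.Set.ofList_eq_foldl, List.foldl_append]
    by_cases hmem : p.1 ∈ pvK qs
    · have hc : (pvK qs).contains p.1 = true := List.elem_eq_true_of_mem hmem
      have hKeq : pvK (qs ++ [p]) = pvK qs := by
        rw [hK]; simp [PySem.Set.add, hmem]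
      simp only [hc, if_true]
      rw [hKeq]
      obtain ⟨k, hk⟩ : ∃ k, PySem.List.index? (pvK qs) p.1 = some k := by
        have := (PySem.List.index?_isSome_iff (xs := pvK qs) (v := p.1)).mpr hmem
        exact Option.isSome_iff_exists.mp this
      obtain ⟨hklt, hkv, hprev⟩ := PySem.List.getElem_of_index?_eq_some hk
      have hnodup : (pvK qs).Nodup := by
        simpa [pvK] using PySem.Set.nodup_ofList (qs.map Prod.fst)
      apply Prod.ext
      · simp
      · simp only [hk, Option.getD_some]
        apply List.ext_getElem
        · simp
        · intro j hj hj'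
          have hjlt : j < (pvK qs).length := by simpa using hj'
          rw [List.getElem_set]
          by_cases hjk : j = k
          · subst hjk
            rw [if_pos rfl]
            have hgd : ((pvK qs).map (pvS qs)).getD j 0 = pvS qs (pvK qs)[j] := by
              rw [List.getD_eq_getElem _ _ (by simpa using hjlt)]
              simp
            rw [hgd, List.getElem_map, pvS_append]
            simp [hkv]
          · have hne : (pvK qs)[j] ≠ p.1 := by
              intro e
              exact hjk (List.Nodup.getElem_inj_iff hnodup |>.mp (e.trans hkv.symm))
            rw [if_neg (fun e => hjk e.symm)]
            rw [List.getElem_map, List.getElem_map, pvS_append]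
            simp [Ne.symm hne]
    · have hc : (pvK qs).contains p.1 = false := by
        rw [Bool.eq_false_iff]; intro e; exact hmem (List.mem_of_elem_eq_true e)
      have hKeq : pvK (qs ++ [p]) = pvK qs ++ [p.1] := by
        rw [hK]; simp [PySem.Set.add, hmem]
      simp only [hc, Bool.false_eq_true, if_false]
      rw [hKeq]
      apply Prod.ext
      · simp
      · have hnot : p.1 ∉ qs.map Prod.fst := by
          intro h; exact hmem (by simpa [pvK] using (PySem.Set.mem_ofList _ _).mpr h)
        simp only [List.map_append, List.map_cons, List.map_nil]
        congr 1
        · apply List.map_congr_left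
          intro v hv
          have hvne : p.1 ≠ v := by
            intro e; subst e; exact hmem hv
          rw [pvS_append]; simp [hvne]
        · rw [pvS_append]
          simp [pvS_not_mem qs p.1 hnot]

-- a fold over two lists indexed by range is a fold over their zip
lemma foldl_range_zip {β : Type} (xs ys : List Int) (h : xs.length ≤ ys.length)
    (g : β → Int → Int → β) (init : β) :
    (List.range xs.length).foldl (fun s i => g s (xs.getD i 0) (ys.getD i 0)) init
      = (xs.zip ys).foldl (fun s p => g s p.1 p.2) init := by
  induction xs generalizing ys init with
  | nil => simp
  | cons x xs ih =>
    cases ys with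
    | nil => simp at h
    | cons y ys =>
      simp only [List.length_cons, List.range_succ_eq_map, List.foldl_cons, List.foldl_map,
        List.zip_cons_cons, List.getD_cons_zero, List.getD_cons_succ]
      exact ih ys (by simpa using h) (g init x y)

-- B's inner scan over the zipped pairs computes the per-key sum
lemma foldl_sum_if (ps : List (Int × Int)) (v : Int) (t : Int) :
    ps.foldl (fun t p => if p.1 = v then t + p.2 else t) t = t + pvS ps v := by
  induction ps generalizing t with
  | nil => simp [pvS]
  | cons p ps ih =>
    rw [List.foldl_cons, ih]
    by_cases h : p.1 = v <;> simp [pvS, h] <;> ring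

-- B's appending loop over the keys is a map
lemma foldl_snoc_map (f : Int → Int) (ks : List Int) (acc : List Int) :
    ks.foldl (fun acc v => acc ++ [f v]) acc = acc ++ ks.map f := by
  induction ks generalizing acc with
  | nil => simp
  | cons k ks ih => rw [List.foldl_cons, ih]; simp

-- ===== VERDICT (by name: the statement is the Claim_ definition above) =====
theorem statistic_spec : Claim_equal_statistic := by
  intro result r_probility _ hpre
  unfold Spec_statistic statistic statistic_alt
  have hpre' : result.length ≤ r_probility.length := hpre
  simp only []
  rw [foldl_range_zip result r_probility hpre'
    (fun (s_r : List Int × List Int) x y =>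
      if s_r.1.contains x then
        (s_r.1, s_r.2.set ((PySem.List.index? s_r.1 x).getD 0)
          (s_r.2.getD ((PySem.List.index? s_r.1 x).getD 0) 0 + y))
      else (s_r.1 ++ [x], s_r.2 ++ [y])) ([], [])]
  rw [pvA_invariant (result.zip r_probility)]
  have hfst : (result.zip r_probility).map Prod.fst = result :=
    List.map_fst_zip hpre'
  have hkeys : pvK (result.zip r_probility) = PySem.List.dedup result := by
    simp [pvK, hfst]
  rw [foldl_snoc_map]
  simp only [List.nil_append]
  rw [← hkeys]
  congr 1
  congr 1
  apply List.map_congr_left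
  intro v _
  rw [foldl_range_zip result r_probility hpre'
    (fun t x y => if x = v then t + y else t) 0]
  rw [foldl_sum_if]
  simp
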